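-- pv_equiv track=rewrite | github.com/Rushilwiz/AI | Unit 4/crossword/Scavotto_z_U4_L4.py | initialProtSymmetry
-- ===== SOURCE A (Python) =====
-- OPENCHAR = "-"  # open square (not decided yet)
--
-- PROTECTEDCHAR = "~"  #protected
--
-- def initialProtSymmetry(board):
--     length = len(board)
--     alphabet = "ABCDEFGHIJKLMNOPQRSTUVWXYZ#"
--     for x in range(length):
--         temp = x + 1
--         if board[x] != OPENCHAR and board[x] != PROTECTEDCHAR and board[x] in alphabet:
--             indexToReplace = length - temp + 1
--             if board[indexToReplace-1] not in alphabet: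
--                 board = board[:indexToReplace -1] + PROTECTEDCHAR + board[indexToReplace:]
--     if length % 2 != 0:
--         indexToReplace = (length // 2) + 1
--         board = board[:indexToReplace -1] + PROTECTEDCHAR + board[indexToReplace:]
--     return board
-- ===== SOURCE B (Python) =====
-- def initialProtSymmetry(board):
--     alphabet = "ABCDEFGHIJKLMNOPQRSTUVWXYZ#"
--     n = len(board)
--     front, back = [], []
--     i, j = 0, n - 1
--     while i < j:
--         a, b = board[i], board[j]
--         front.append('~' if a not in alphabet and b in alphabet else a)
--         back.append('~' if b not in alphabet and a in alphabet else b)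
--         i += 1
--         j -= 1
--     mid = ['~'] if n % 2 == 1 else []
--     return ''.join(front) + ''.join(mid) + ''.join(reversed(back))
-- ===== Notes on version B (the rewrite author's own statement) =====
-- stated objective: alternative
-- what changed: A scatters over a mutating string, re-slicing and rebuilding the whole board to overwrite the mirror of each alphabet cell; B never mutates: two pointers walk inward from both ends, decide each symmetric pair at once into front/back accumulators, and the result is front + centre + reversed back.
import Mathlib
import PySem

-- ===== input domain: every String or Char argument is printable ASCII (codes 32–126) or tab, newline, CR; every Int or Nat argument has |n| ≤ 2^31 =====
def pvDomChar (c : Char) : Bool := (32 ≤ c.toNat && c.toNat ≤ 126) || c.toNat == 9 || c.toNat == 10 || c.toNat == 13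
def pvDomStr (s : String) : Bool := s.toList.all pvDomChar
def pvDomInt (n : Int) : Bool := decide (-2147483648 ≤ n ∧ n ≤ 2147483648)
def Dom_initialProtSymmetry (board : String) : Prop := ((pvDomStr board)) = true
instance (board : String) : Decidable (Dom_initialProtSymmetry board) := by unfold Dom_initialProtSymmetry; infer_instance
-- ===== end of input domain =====

-- B uses two pointers moving inward from both ends, deciding each symmetric pair at once and
-- concatenating front ++ centre ++ reversed back, instead of A's repeated slice-and-rebuild
-- scatter over a mutating string; objective: alternative (mutation-free pairwise traversal).


-- ===== PORT A =====
-- alphabet = "ABCDEFGHIJKLMNOPQRSTUVWXYZ#"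
def pvAlphabet : List Char := "ABCDEFGHIJKLMNOPQRSTUVWXYZ#".toList

-- one iteration of A's for-loop (board as List Char; board[x] is always in range, so
-- pyGetD is exact here; 'c ∈ pvAlphabet' is exactly Python's 1-char 'in alphabet')
def pvStepA (length : Int) (b : List Char) (x : Int) : List Char :=
  let temp := x + 1
  let c := PySem.List.pyGetD b x ' '
  if c ≠ '-' ∧ c ≠ '~' ∧ c ∈ pvAlphabet then
    let indexToReplace := length - temp + 1
    if (PySem.List.pyGetD b (indexToReplace - 1) ' ') ∉ pvAlphabet then
      PySem.List.slice b none (some (indexToReplace - 1)) ++ ['~']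
        ++ PySem.List.slice b (some indexToReplace) none
    else b
  else b

def initialProtSymmetry (board : String) : String :=
  let cs := board.toList
  let length : Int := cs.length
  let cs' := (PySem.List.pyRange 0 length 1).foldl (pvStepA length) cs
  let cs'' :=
    if PySem.Int.mod length 2 ≠ 0 then
      let indexToReplace := PySem.Int.floordiv length 2 + 1
      PySem.List.slice cs' none (some (indexToReplace - 1)) ++ ['~']
        ++ PySem.List.slice cs' (some indexToReplace) none
    else cs'
  String.ofList cs''

-- ===== PORT B =====
-- B's while-loop: two pointers i < j move inward, appending the decided character for
-- position i to `front` and for position j to `back` (both i and j are always in range,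
-- so getD is exact); terminates because j - i shrinks
def pvPairB (cs : List Char) (i j : Nat) (front back : List Char) : List Char × List Char :=
  if i < j then
    let a := cs.getD i ' '
    let b := cs.getD j ' '
    pvPairB cs (i + 1) (j - 1)
      (front ++ [if a ∉ pvAlphabet ∧ b ∈ pvAlphabet then '~' else a])
      (back ++ [if b ∉ pvAlphabet ∧ a ∈ pvAlphabet then '~' else b])
  else (front, back)
termination_by j - i

def initialProtSymmetry_alt (board : String) : String :=
  let cs := board.toList
  let n := cs.length
  let fb := pvPairB cs 0 (n - 1) [] []
  let mid := if n % 2 = 1 then ['~'] else []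
  String.ofList (fb.1 ++ mid ++ fb.2.reverse)

-- ===== PRECONDITION & SPEC =====
def Spec_initialProtSymmetry (board : String) (out : String) : Prop := out = initialProtSymmetry_alt board
instance (board : String) (out : String) : Decidable (Spec_initialProtSymmetry board out) := by unfold Spec_initialProtSymmetry; infer_instance

-- ===== CLAIM (what is proved, stated in full; the proofs are below) =====
def Claim_equal_initialProtSymmetry : Prop := ∀ (board : String), Dom_initialProtSymmetry board → Spec_initialProtSymmetry board (initialProtSymmetry board)

-- ===== LEMMAS AND PROOFS =====

-- the per-position "gather" characterisation both ports are reduced to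
def pvG (cs : List Char) (p : Nat) : Char :=
  if cs.getD p ' ' ∉ pvAlphabet ∧ cs.getD (cs.length - 1 - p) ' ' ∈ pvAlphabet then '~'
  else cs.getD p ' '

-- loop invariant shape: the board after k iterations of A's loop
def pvF (cs : List Char) (k p : Nat) : Char :=
  if cs.length ≤ p + k ∧ cs.getD p ' ' ∉ pvAlphabet ∧ cs.getD (cs.length - 1 - p) ' ' ∈ pvAlphabet
  then '~' else cs.getD p ' '

theorem pvGetD_map_range {α : Type} (f : Nat → α) {n k : Nat} (hk : k < n) (d : α) :
    ((List.range n).map f).getD k d = f k := by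
  rw [List.getD_eq_getElem?_getD]
  simp [hk]

theorem pvMap_range_ext {α : Type} (f g : Nat → α) (n : Nat) (h : ∀ p, p < n → f p = g p) :
    (List.range n).map f = (List.range n).map g :=
  List.map_congr_left (fun p hp => h p (List.mem_range.mp hp))

-- a position other than this iteration's mirror is unchanged by raising k to k+1
theorem pvF_succ_of_ne (cs : List Char) (k p : Nat) (hk : k < cs.length)
    (hpm : p ≠ cs.length - 1 - k) : pvF cs (k + 1) p = pvF cs k p := by
  unfold pvF
  by_cases h2 : cs.getD p ' ' ∉ pvAlphabet ∧ cs.getD (cs.length - 1 - p) ' ' ∈ pvAlphabet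
  · by_cases h1 : cs.length ≤ p + k
    · rw [if_pos ⟨by omega, h2⟩, if_pos ⟨h1, h2⟩]
    · rw [if_neg (fun h => hpm (by omega)), if_neg (fun h => h1 h.1)]
  · rw [if_neg (fun h => h2 h.2), if_neg (fun h => h2 h.2)]

-- board[:m] + '~' + board[m+1:] is set m '~'
theorem pvSet_eq (b : List Char) (m : Nat) (hm : m < b.length) :
    PySem.List.slice b none (some ((m : Int))) ++ ['~']
      ++ PySem.List.slice b (some ((m : Int) + 1)) none = b.set m '~' := by
  have h2 : (m : Int) + 1 = (((m + 1 : Nat)) : Int) := by push_cast; ring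
  rw [h2, PySem.List.slice_to_natCast, PySem.List.slice_from_natCast,
      List.set_eq_take_cons_drop _ hm]
  simp

theorem pvStepA_inv (cs : List Char) (k : Nat) (hk : k < cs.length) :
    pvStepA (cs.length : Int) ((List.range cs.length).map (pvF cs k)) (k : Int)
      = (List.range cs.length).map (pvF cs (k + 1)) := by
  have hlen : ((List.range cs.length).map (pvF cs k)).length = cs.length := by simp
  set n := cs.length with hn
  have hm : n - 1 - k < n := by omega
  have hmk : n - 1 - (n - 1 - k) = k := by omega
  have hdash : ('-' : Char) ∉ pvAlphabet := by decide
  have htilde : ('~' : Char) ∉ pvAlphabet := by decide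
  unfold pvStepA
  simp only [PySem.List.pyGetD_natCast, pvGetD_map_range (pvF cs k) hk]
  by_cases hck : cs.getD k ' ' ∈ pvAlphabet
  · -- board[k] is in the alphabet (so pvF cs k k = cs.getD k ' ')
    have hfk : pvF cs k k = cs.getD k ' ' := by
      unfold pvF; rw [if_neg (fun h => h.2.1 hck)]
    have hidx : (n : Int) - ((k : Int) + 1) + 1 - 1 = ((n - 1 - k : Nat) : Int) := by omega
    have hidx2 : (n : Int) - ((k : Int) + 1) + 1 = ((n - 1 - k : Nat) : Int) + 1 := by omega
    rw [if_pos ⟨by rw [hfk]; exact fun h => hdash (h ▸ hck),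
                by rw [hfk]; exact fun h => htilde (h ▸ hck),
                by rw [hfk]; exact hck⟩]
    rw [hidx, hidx2, PySem.List.pyGetD_natCast, pvGetD_map_range (pvF cs k) hm]
    have hfm : pvF cs k (n - 1 - k) = cs.getD (n - 1 - k) ' ' := by
      unfold pvF; rw [if_neg (fun h => by omega)]
    rw [hfm]
    by_cases hcm : cs.getD (n - 1 - k) ' ' ∈ pvAlphabet
    · -- mirror already alphabetic: no write
      rw [if_neg (not_not_intro hcm)]
      apply pvMap_range_ext
      intro p hp
      by_cases hpm : p = n - 1 - k
      · subst hpm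
        unfold pvF
        rw [if_neg (fun h => h.2.1 hcm), if_neg (fun h => h.2.1 hcm)]
      · exact (pvF_succ_of_ne cs k p hk hpm).symm
    · -- write '~' at the mirror index
      rw [if_pos hcm, pvSet_eq _ _ (by rw [hlen]; exact hm)]
      apply List.ext_getElem (by simp)
      intro p hp1 hp2
      have hp : p < n := by simpa using hp2
      simp only [List.getElem_set, List.getElem_map, List.getElem_range]
      by_cases hpm : n - 1 - k = p
      · rw [if_pos hpm]
        unfold pvF
        rw [if_pos ⟨by omega, by rw [← hpm]; exact hcm, by rw [← hpm, hmk]; exact hck⟩]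
      · rw [if_neg hpm]
        exact (pvF_succ_of_ne cs k p hk (fun h => hpm h.symm)).symm
  · -- board[k] not in the alphabet: no write this iteration
    have hfkn : pvF cs k k ∉ pvAlphabet := by
      unfold pvF; split
      · exact htilde
      · exact hck
    rw [if_neg (fun h => hfkn h.2.2)]
    apply pvMap_range_ext
    intro p hp
    by_cases hpm : p = n - 1 - k
    · subst hpm
      unfold pvF
      rw [if_neg (by rw [hmk]; exact fun h => hck h.2.2),
          if_neg (by rw [hmk]; exact fun h => hck h.2.2)]
    · exact (pvF_succ_of_ne cs k p hk hpm).symm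

theorem pvLoop_inv (cs : List Char) (k : Nat) (hk : k ≤ cs.length) :
    (PySem.List.pyRange 0 (k : Int) 1).foldl (pvStepA (cs.length : Int)) cs
      = (List.range cs.length).map (pvF cs k) := by
  induction k with
  | zero =>
      rw [PySem.List.pyRange_one_eq_nil (by omega)]
      simp only [List.foldl_nil]
      apply List.ext_getElem (by simp)
      intro p hp1 hp2
      simp only [List.getElem_map, List.getElem_range]
      unfold pvF
      rw [if_neg (fun h => by omega), List.getD_eq_getElem?_getD,
          List.getElem?_eq_getElem hp1]
      rfl
  | succ k ih =>
      have h1 : ((k + 1 : Nat) : Int) = (k : Int) + 1 := by push_cast; ring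
      rw [h1, PySem.List.pyRange_one_succ_right (by omega), List.foldl_append,
          ih (by omega)]
      simp [pvStepA_inv cs k (by omega)]

-- A's final result, per position, is the gather formula (with the centre forced when odd)
theorem pvA_char (board : String) :
    initialProtSymmetry board
      = String.ofList
          (if board.toList.length % 2 = 1
           then ((List.range board.toList.length).map (pvG board.toList)).set
                  (board.toList.length / 2) '~'
           else (List.range board.toList.length).map (pvG board.toList)) := by
  unfold initialProtSymmetry
  simp only
  set cs := board.toList with hcs
  set n := cs.length with hn
  rw [pvLoop_inv cs n (le_refl n)]
  have hbody : (List.range n).map (pvF cs n) = (List.range n).map (pvG cs) := by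
    apply pvMap_range_ext
    intro p hp
    unfold pvF pvG
    by_cases h2 : cs.getD p ' ' ∉ pvAlphabet ∧ cs.getD (n - 1 - p) ' ' ∈ pvAlphabet
    · rw [if_pos ⟨by omega, h2⟩, if_pos h2]
    · rw [if_neg (fun h => h2 h.2), if_neg h2]
  have hmod : PySem.Int.mod (n : Int) 2 = ((n % 2 : Nat) : Int) := by simp
  by_cases hodd : n % 2 = 1
  · rw [if_pos (by rw [hmod]; omega), if_pos hodd]
    have hdiv : PySem.Int.floordiv (n : Int) 2 + 1 - 1 = (((n / 2 : Nat)) : Int) := by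
      have := PySem.Int.floordiv_natCast n 2
      push_cast at this
      omega
    have hdiv2 : PySem.Int.floordiv (n : Int) 2 + 1 = (((n / 2 : Nat)) : Int) + 1 := by
      have := PySem.Int.floordiv_natCast n 2
      push_cast at this
      omega
    rw [hdiv, hdiv2, pvSet_eq _ (n / 2) (by simp only [List.length_map, List.length_range]; omega),
        hbody]
  · rw [if_neg (by rw [hmod]; omega), if_neg hodd, hbody]

-- B's pair loop, started at pointers (i, n-1-i), appends exactly the gather characters
-- for positions i..n/2-1 to front and their mirrors to back
theorem pvPairB_spec (cs : List Char) (m : Nat) :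
    ∀ (i : Nat) (F B : List Char), 2 * i ≤ cs.length → cs.length / 2 - i = m →
      pvPairB cs i (cs.length - 1 - i) F B
        = (F ++ (List.range' i (cs.length / 2 - i)).map (pvG cs),
           B ++ (List.range' i (cs.length / 2 - i)).map (fun k => pvG cs (cs.length - 1 - k))) := by
  induction m with
  | zero =>
      intro i F B hi hm
      unfold pvPairB
      rw [if_neg (by omega), hm]
      simp
  | succ m ih =>
      intro i F B hi hm
      set n := cs.length with hn
      have hij : i < n - 1 - i := by omega
      unfold pvPairB
      rw [if_pos hij]
      have hj1 : n - 1 - i - 1 = n - 1 - (i + 1) := by omega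
      have hmi : n - 1 - (n - 1 - i) = i := by omega
      rw [hj1, ih (i + 1) _ _ (by omega) (by omega)]
      have hfa : (if cs.getD i ' ' ∉ pvAlphabet ∧ cs.getD (n - 1 - i) ' ' ∈ pvAlphabet
                  then '~' else cs.getD i ' ') = pvG cs i := by unfold pvG; rfl
      have hba : (if cs.getD (n - 1 - i) ' ' ∉ pvAlphabet ∧ cs.getD i ' ' ∈ pvAlphabet
                  then '~' else cs.getD (n - 1 - i) ' ') = pvG cs (n - 1 - i) := by
        unfold pvG; rw [hmi]
      have hrange : List.range' i (n / 2 - i) = i :: List.range' (i + 1) (n / 2 - (i + 1)) := by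
        have : n / 2 - i = (n / 2 - (i + 1)) + 1 := by omega
        rw [this, List.range'_succ]
      rw [hfa, hba, hrange]
      simp

-- concatenating front ++ centre ++ reversed back gives the same list as A's characterisation
theorem pvAssemble (cs : List Char) :
    ((List.range' 0 (cs.length / 2)).map (pvG cs))
      ++ (if cs.length % 2 = 1 then ['~'] else [])
      ++ ((List.range' 0 (cs.length / 2)).map (fun k => pvG cs (cs.length - 1 - k))).reverse
    = (if cs.length % 2 = 1
       then ((List.range cs.length).map (pvG cs)).set (cs.length / 2) '~'
       else (List.range cs.length).map (pvG cs)) := by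
  set n := cs.length with hn
  by_cases hmid : n % 2 = 1
  · rw [if_pos hmid, if_pos hmid]
    apply List.ext_getElem (by simp; omega)
    intro p hp1 hp2
    have hp : p < n := by simpa using hp2
    simp only [List.getElem_set, List.getElem_map, List.getElem_range]
    rcases lt_trichotomy p (n / 2) with hlt | heq | hgt
    · rw [List.getElem_append_left (by simp; omega),
          List.getElem_append_left (by simp; omega)]
      simp only [List.getElem_map, List.getElem_range']
      rw [if_neg (by omega)]
      congr 1
      omega
    · rw [List.getElem_append_left (by simp; omega),
          List.getElem_append_right (by simp; omega)]
      simp only [List.length_map, List.length_range']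
      rw [if_pos heq.symm]
      simp [heq]
    · rw [List.getElem_append_right (by simp; omega)]
      simp only [List.getElem_reverse, List.getElem_map, List.getElem_range',
        List.length_append, List.length_map, List.length_range',
        List.length_cons, List.length_nil]
      rw [if_neg (by omega)]
      congr 1
      omega
  · rw [if_neg hmid, if_neg hmid]
    apply List.ext_getElem (by simp; omega)
    intro p hp1 hp2
    have hp : p < n := by simpa using hp2
    simp only [List.getElem_map, List.getElem_range]
    rcases lt_or_ge p (n / 2) with hlt | hge
    · rw [List.getElem_append_left (by simp; omega),
          List.getElem_append_left (by simp; omega)]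
      simp only [List.getElem_map, List.getElem_range']
      congr 1
      omega
    · rw [List.getElem_append_right (by simp; omega)]
      simp only [List.getElem_reverse, List.getElem_map, List.getElem_range',
        List.length_append, List.length_map, List.length_range',
        List.length_nil]
      congr 1
      omega

-- ===== VERDICT (by name: the statement is the Claim_ definition above) =====
theorem initialProtSymmetry_spec : Claim_equal_initialProtSymmetry := by
  intro board _
  unfold Spec_initialProtSymmetry
  rw [pvA_char]
  unfold initialProtSymmetry_alt
  simp only
  have hs := pvPairB_spec board.toList (board.toList.length / 2) 0 [] []
    (by omega) (by omega)
  simp only [Nat.sub_zero] at hs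
  rw [hs]
  exact congrArg String.ofList (pvAssemble board.toList).symm
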